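-- pv_equiv track=rewrite | github.com/pawel-rogoz/pw-assignments | semester-5/machine-learning-engineering/project/genresOperations.py | findPopularity
-- ===== SOURCE A (Python) =====
-- def findPopularity(dictionary):
--     genres = {}
--     for artist in dictionary:
--         for genre in artist['genres']:
--             if genre in genres:
--                 genres[genre] += 1
--             else:
--                 genres[genre] = 1
--     return genres
-- ===== SOURCE B (Python) =====
-- def findPopularity(dictionary):
--     flat = []
--     for artist in dictionary:
--         flat += artist['genres']
--     result = {}
--     while flat:
--         g = flat[0]
--         result[g] = flat.count(g)
--         flat = [x for x in flat if x != g]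
--     return result
-- ===== Notes on version B (the rewrite author's own statement) =====
-- stated objective: alternative
-- what changed: Replaces the nested hash-increment counting with a two-stage pass: flatten all genres into one list, then repeatedly take the first remaining genre, count it, and filter out all its occurrences until the list is empty.
import Mathlib
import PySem

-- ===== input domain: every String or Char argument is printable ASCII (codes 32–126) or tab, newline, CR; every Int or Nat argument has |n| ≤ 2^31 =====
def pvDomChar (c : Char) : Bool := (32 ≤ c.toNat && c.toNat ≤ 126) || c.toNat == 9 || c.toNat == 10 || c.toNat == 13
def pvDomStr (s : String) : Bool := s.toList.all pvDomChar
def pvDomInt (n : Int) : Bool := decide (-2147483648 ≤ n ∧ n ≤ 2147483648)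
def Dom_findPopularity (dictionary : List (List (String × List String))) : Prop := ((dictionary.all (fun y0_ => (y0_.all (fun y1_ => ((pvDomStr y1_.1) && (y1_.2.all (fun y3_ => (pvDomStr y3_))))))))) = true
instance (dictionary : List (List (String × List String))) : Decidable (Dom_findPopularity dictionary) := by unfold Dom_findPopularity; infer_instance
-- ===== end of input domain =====

-- B replaces the nested hash-increment counting by flatten, then repeated take-first/count/filter-out (alternative decomposition, not faster).
-- ===== PORT A =====
def findPopularity (dictionary : List (List (String × List String))) : List (String × Int) :=
  (dictionary.foldl (fun genres artist =>
      (((PySem.Dict.mk artist).get? "genres").getD []).foldl (fun genres genre =>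
        if genres.contains genre then
          genres.insert genre (genres.getD genre 0 + 1)
        else
          genres.insert genre 1) genres)
    PySem.Dict.empty).items

-- ===== PORT B =====
-- the 'while flat:' loop of Source B: take first genre, record its count, filter it out
def tallyRuns (flat : List String) : List (String × Int) :=
  match flat with
  | [] => []
  | g :: rest =>
      (g, ((g :: rest).count g : Int)) ::
        tallyRuns ((g :: rest).filter (fun x => !(x == g)))
termination_by flat.length
decreasing_by
  simp [List.filter]
  exact List.length_filter_le _ _

def findPopularity_alt (dictionary : List (List (String × List String))) : List (String × Int) :=
  let flat := dictionary.foldl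
    (fun acc artist => acc ++ (((PySem.Dict.mk artist).get? "genres").getD [])) []
  tallyRuns flat

-- ===== PRECONDITION & SPEC =====
-- Pre_ excludes exactly the inputs where Python A raises KeyError: an artist dict without the 'genres' key.
def Pre_findPopularity (dictionary : List (List (String × List String))) : Prop :=
  (dictionary.all (fun artist => (PySem.Dict.mk artist).contains "genres")) = true
instance (dictionary : List (List (String × List String))) : Decidable (Pre_findPopularity dictionary) := by unfold Pre_findPopularity; infer_instance

def pvWitness_findPopularity : (List (List (String × List String))) :=
  [[("genres", ["rock", "pop"])], [("genres", ["rock"])]]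

def Spec_findPopularity (dictionary : List (List (String × List String))) (out : List (String × Int)) : Prop := out = findPopularity_alt dictionary
instance (dictionary : List (List (String × List String))) (out : List (String × Int)) : Decidable (Spec_findPopularity dictionary out) := by unfold Spec_findPopularity; infer_instance

-- ===== CLAIM (what is proved, stated in full; the proofs are below) =====
def Claim_equal_findPopularity : Prop := ∀ (dictionary : List (List (String × List String))), Dom_findPopularity dictionary → Pre_findPopularity dictionary → Spec_findPopularity dictionary (findPopularity dictionary)

-- ===== LEMMAS AND PROOFS =====

-- if a key is absent, looking it up with default 0 yields 0
theorem getD_of_not_contains (d : PySem.Dict String Int) (x : String)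
    (h : d.contains x = false) : d.getD x 0 = 0 := by
  simp only [PySem.Dict.contains, List.any_eq_false, beq_iff_eq, Prod.forall,
    PySem.Dict.getD, PySem.Dict.get?] at *
  rw [List.find?_eq_none.mpr]
  · rfl
  · rintro ⟨a, b⟩ hm; simpa using h a b hm

-- A's loop body is exactly the counter step 'd.insert x (d.getD x 0 + 1)'
theorem body_eq (d : PySem.Dict String Int) (x : String) :
    (if d.contains x then d.insert x (d.getD x 0 + 1) else d.insert x 1) =
      d.insert x (d.getD x 0 + 1) := by
  by_cases h : d.contains x
  · simp [h]
  · simp only [Bool.not_eq_true] at h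
    simp [h, getD_of_not_contains d x h]

-- discarding twice in either order is the same double filter
theorem discard_comm (s : PySem.Set String) (a b : String) :
    (s.discard a).discard b = (s.discard b).discard a := by
  simp only [PySem.Set.discard, List.filter_filter]
  exact List.filter_congr (fun z _ => Bool.and_comm _ _)

-- discarding the same element twice is discarding it once
theorem discard_idem (s : PySem.Set String) (a : String) :
    (s.discard a).discard a = s.discard a := by
  simp only [PySem.Set.discard, List.filter_filter]
  exact List.filter_congr (fun z _ => Bool.and_self _)

theorem discard_cons_self (a : String) (s : PySem.Set String) :
    PySem.Set.discard (a :: s) a = s.discard a := by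
  simp [PySem.Set.discard]

theorem discard_cons_ne (a b : String) (s : PySem.Set String) (h : b ≠ a) :
    PySem.Set.discard (b :: s) a = b :: s.discard a := by
  simp [PySem.Set.discard, h]

-- building the dedup set of a filtered list = discarding from the dedup set
theorem ofList_filter_ne (x : String) (xs : List String) :
    PySem.Set.ofList (xs.filter (fun y => !(y == x))) = (PySem.Set.ofList xs).discard x := by
  induction xs with
  | nil => rfl
  | cons y ys ih =>
    rw [List.filter_cons, PySem.Set.ofList_cons]
    by_cases h : y = x
    · subst h
      simp only [beq_self_eq_true, Bool.not_true, Bool.false_eq_true, if_false, ih,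
        discard_cons_self, discard_idem]
    · have hb : (y == x) = false := beq_eq_false_iff_ne.mpr h
      simp only [hb, Bool.not_false, if_true, PySem.Set.ofList_cons, ih,
        discard_cons_ne x y _ h, discard_comm]

-- B's while-loop equals the map over first-occurrence distinct genres with their counts
theorem tallyRuns_eq (l : List String) :
    tallyRuns l = (PySem.Set.ofList l).map (fun g => (g, (l.count g : Int))) := by
  induction l using tallyRuns.induct with
  | case1 => simp [tallyRuns]
  | case2 g rest ih =>
    rw [tallyRuns, ih, PySem.Set.ofList_cons, List.map_cons]
    congr 1
    have hf : (g :: rest).filter (fun x => !(x == g)) = rest.filter (fun x => !(x == g)) := by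
      simp
    rw [hf, ofList_filter_ne]
    refine List.map_congr_left (fun h hm => ?_)
    have hne : h ≠ g := ((PySem.Set.mem_discard _ _ _).mp hm).2
    have hc : List.count h (List.filter (fun x => !(x == g)) (g :: rest)) =
        List.count h (g :: rest) := List.count_filter (by simp [hne])
    rw [hf] at hc
    rw [hc]

-- ===== VERDICT (by name: the statement is the Claim_ definition above) =====
theorem findPopularity_spec : Claim_equal_findPopularity := by
  intro dictionary _ _
  show findPopularity dictionary = findPopularity_alt dictionary
  unfold findPopularity findPopularity_alt
  simp only [body_eq]
  rw [← List.foldl_flatMap, PySem.Dict.foldl_insert_getD_add_one_eq_counter,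
    PySem.Dict.items_counter, PySem.List.foldl_append_eq_flatMap, List.nil_append,
    tallyRuns_eq]
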